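-- pv_equiv track=rewrite | github.com/Aryanamish/daily_practice | codechef/22-07-22/concat_sort.py | solve
-- ===== SOURCE A (Python) =====
-- def solve(n, arr):
--     sorted_arr = sorted(arr)
--     counter1 = 0
--     counter2 = 0
--     zeros = [0] * n
--     for i in range(2):
--         counter1 = 0
--         while counter1 < n:
--             if not zeros[counter1] and arr[counter1] == sorted_arr[counter2]:
--                 zeros[counter1] = 1
--                 counter1 += 1
--                 counter2 += 1
--             else:
--                 counter1 += 1
--     return "YES" if counter1 == counter2 else "NO"
-- ===== SOURCE B (Python) =====
-- def solve(n, arr):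
--     # One greedy pass matching the first n elements against sorted(arr); the answer is
--     # YES iff the unmatched leftovers are exactly the next chunk of the sorted array
--     # (i.e. a single further pass would consume them all).
--     s = sorted(arr)
--     i = 0
--     rem = []
--     for x in arr[:max(0, n)]:
--         if i < len(s) and x == s[i]:
--             i += 1
--         else:
--             rem.append(x)
--     return "YES" if rem == s[i:i + len(rem)] else "NO"
-- ===== Notes on version B (the rewrite author's own statement) =====
-- stated objective: simpler
-- what changed: A simulates two full greedy passes over the array with a consumed-flag table and re-scans; B does a single greedy pass collecting the unmatched leftovers and answers YES iff those leftovers are exactly the next chunk of the sorted array, which provably coincides with the second pass succeeding.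
import Mathlib
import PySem

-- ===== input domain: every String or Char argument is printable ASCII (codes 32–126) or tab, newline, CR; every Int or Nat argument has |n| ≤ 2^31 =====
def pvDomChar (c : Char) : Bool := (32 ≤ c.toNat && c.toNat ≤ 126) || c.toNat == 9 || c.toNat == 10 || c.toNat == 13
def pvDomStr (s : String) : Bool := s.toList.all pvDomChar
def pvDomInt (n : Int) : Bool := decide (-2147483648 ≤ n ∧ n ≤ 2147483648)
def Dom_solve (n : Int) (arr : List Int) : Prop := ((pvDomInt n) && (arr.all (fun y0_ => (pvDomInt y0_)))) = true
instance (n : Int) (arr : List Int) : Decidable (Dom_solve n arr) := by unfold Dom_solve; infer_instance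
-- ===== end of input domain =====

-- B replaces A's second simulated pass (with its consumed-flag table) by a single greedy
-- pass collecting unmatched leftovers plus a check that those leftovers are exactly the
-- next chunk of the sorted array: simpler.

-- ===== PORT A =====
-- the 'while counter1 < n' loop of A over the state (zeros, counter1, counter2)
def solveLoop (n : Int) (arr sortedArr : List Int) (zeros : List Int) (c1 c2 : Int) :
    List Int × Int × Int :=
  if h : c1 < n then
    if PySem.List.pyGet? zeros c1 = some 0 ∧
       PySem.List.pyGet? arr c1 = PySem.List.pyGet? sortedArr c2 then
      solveLoop n arr sortedArr (zeros.set c1.toNat 1) (c1 + 1) (c2 + 1)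
    else
      solveLoop n arr sortedArr zeros (c1 + 1) c2
  else (zeros, c1, c2)
  termination_by (n - c1).toNat
  decreasing_by all_goals omega

def solve (n : Int) (arr : List Int) : String :=
  let sortedArr := PySem.List.sorted arr (fun x => x)
  let zeros := List.replicate n.toNat (0 : Int)
  -- for i in range(2): counter1 = 0; while …
  let st := (PySem.List.pyRange 0 2 1).foldl
    (fun (st : List Int × Int × Int) _ => solveLoop n arr sortedArr st.1 0 st.2.2)
    (zeros, 0, 0)
  if st.2.1 == st.2.2 then "YES" else "NO"

-- ===== PORT B =====
def solve_alt (n : Int) (arr : List Int) : String :=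
  let s := PySem.List.sorted arr (fun x => x)
  let st := (PySem.List.slice arr none (some (max 0 n))).foldl
    (fun (st : Int × List Int) x =>
      if st.1 < (s.length : Int) ∧ PySem.List.pyGet? s st.1 = some x then
        (st.1 + 1, st.2)
      else (st.1, st.2 ++ [x]))
    ((0 : Int), ([] : List Int))
  if st.2 == PySem.List.slice s (some st.1) (some (st.1 + (st.2.length : Int))) then "YES"
  else "NO"

-- ===== PRECONDITION & SPEC =====
-- Exactly the inputs on which A returns: for n > len(arr) A raises IndexError while
-- scanning past the end of arr.
def Pre_solve (n : Int) (arr : List Int) : Prop := n ≤ (arr.length : Int)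
instance (n : Int) (arr : List Int) : Decidable (Pre_solve n arr) := by
  unfold Pre_solve; infer_instance

def pvWitness_solve : Int × List Int := (3, [2, 1, 2])

def Spec_solve (n : Int) (arr : List Int) (out : String) : Prop := out = solve_alt n arr
instance (n : Int) (arr : List Int) (out : String) : Decidable (Spec_solve n arr out) := by
  unfold Spec_solve; infer_instance

-- ===== CLAIM (what is proved, stated in full; the proofs are below) =====
def Claim_equal_solve : Prop :=
  ∀ (n : Int) (arr : List Int), Dom_solve n arr → Pre_solve n arr → Spec_solve n arr (solve n arr)

-- ===== LEMMAS AND PROOFS =====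

-- Abstract greedy pass: match xs left to right against the target t (head first);
-- returns (leftover elements in order, unconsumed suffix of the target).
def passL : List Int → List Int → List Int × List Int
  | [], t => ([], t)
  | x :: xs, [] => (x :: xs, [])
  | x :: xs, y :: t =>
    if x = y then passL xs t
    else ((passL xs (y :: t)).1.cons x, (passL xs (y :: t)).2)

-- elements of xs whose flag in z is still 0, in order
def mask : List Int → List Int → List Int
  | b :: bs, x :: xs => if b = 0 then x :: mask bs xs else mask bs xs
  | _, _ => []

lemma passL_nil_target (xs : List Int) : passL xs [] = (xs, []) := by
  cases xs <;> rfl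

lemma passL_snd_length_le (xs t : List Int) : (passL xs t).2.length ≤ t.length := by
  fun_induction passL xs t with
  | case1 t => simp
  | case2 x xs => simp
  | case3 xs y t ih => simpa using Nat.le_succ_of_le ih
  | case4 x xs y t h ih => simpa using ih

lemma passL_snd_eq_drop (xs t : List Int) :
    (passL xs t).2 = t.drop (t.length - (passL xs t).2.length) := by
  fun_induction passL xs t with
  | case1 t => simp
  | case2 x xs => simp
  | case3 xs y t ih =>
    have hle := passL_snd_length_le xs t
    have h1 : (y :: t).length - (passL xs t).2.length
        = (t.length - (passL xs t).2.length) + 1 := by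
      simp only [List.length_cons]; omega
    rw [h1, List.drop_succ_cons]
    exact ih
  | case4 x xs y t h ih => simpa using ih

lemma passL_perm (xs t : List Int) :
    (xs ++ (passL xs t).2).Perm ((passL xs t).1 ++ t) := by
  fun_induction passL xs t with
  | case1 t => simp
  | case2 x xs => simpa using List.perm_append_comm
  | case3 xs y t ih =>
    simpa using (ih.cons y).trans List.perm_middle.symm
  | case4 x xs y t h ih => simpa using ih.cons x

lemma passL_prefix (xs rest : List Int) : passL xs (xs ++ rest) = ([], rest) := by
  induction xs with
  | nil => rfl
  | cons x xs ih => simp [passL, ih]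

lemma passL_fst_nil (xs t : List Int) :
    (passL xs t).1 = [] → t = xs ++ (passL xs t).2 := by
  fun_induction passL xs t with
  | case1 t => intro _; simp
  | case2 x xs => intro h; simp at h
  | case3 xs y t ih => intro h; simpa using ih h
  | case4 x xs y t h ih => intro hh; simp at hh

lemma mask_replicate_zero (xs : List Int) :
    mask (List.replicate xs.length 0) xs = xs := by
  induction xs with
  | nil => rfl
  | cons x xs ih => simpa [mask, List.replicate_succ] using ih

lemma mask_replicate_zero_of_len (xs : List Int) (n : Nat) (h : xs.length = n) :
    mask (List.replicate n 0) xs = xs := by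
  subst h; exact mask_replicate_zero xs

lemma mask_append (bs cs xs ys : List Int) (h : bs.length = xs.length) :
    mask (bs ++ cs) (xs ++ ys) = mask bs xs ++ mask cs ys := by
  induction bs generalizing xs with
  | nil =>
    cases xs with
    | nil => simp [mask]
    | cons x xs => simp at h
  | cons b bs ih =>
    cases xs with
    | nil => simp at h
    | cons x xs =>
      simp only [List.length_cons] at h
      by_cases hb : b = 0 <;> simp [mask, hb, ih xs (by omega)]

-- The bridge: one execution of A's while loop with bound nn ≤ len(arr), started at
-- position j with c2 = m and flag table z, computes exactly the abstract greedy pass of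
-- the unconsumed suffix of the first nn elements against the target suffix.
lemma loop_bridge (arr s : List Int) (nn : Nat) (hnn : nn ≤ arr.length) :
    ∀ (fuel j m : Nat) (z : List Int), j + fuel = nn →
      z.length = nn → m ≤ s.length →
      ∃ z', solveLoop (nn : Int) arr s z (j : Int) (m : Int) =
          (z', (nn : Int),
           ((m + ((s.drop m).length - (passL (mask (z.drop j) ((arr.take nn).drop j)) (s.drop m)).2.length) : Nat) : Int)) ∧
        z'.length = nn ∧
        mask z' (arr.take nn) = mask (z.take j) ((arr.take nn).take j)
          ++ (passL (mask (z.drop j) ((arr.take nn).drop j)) (s.drop m)).1 := by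
  intro fuel
  have hlen_p : (arr.take nn).length = nn := by simp [List.length_take]; omega
  induction fuel with
  | zero =>
    intro j m z hj hz hm
    have hjN : nn = j := by omega
    subst hjN
    have hdz : z.drop nn = [] := List.drop_eq_nil_of_le (by omega)
    have hda : (arr.take nn).drop nn = [] := List.drop_eq_nil_of_le (by omega)
    have htz : z.take nn = z := List.take_of_length_le (by omega)
    have hta : (arr.take nn).take nn = arr.take nn := List.take_of_length_le (by omega)
    refine ⟨z, ?_, hz, ?_⟩
    · rw [solveLoop, dif_neg (by omega)]
      rw [hdz, hda]
      simp [mask, passL]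
    · rw [hdz, hda, htz, hta]
      simp [mask, passL]
  | succ fuel ih =>
    intro j m z hj hz hm
    have hjN : j < nn := by omega
    have hja : j < arr.length := by omega
    have hjp : j < (arr.take nn).length := by omega
    have hzj : j < z.length := by omega
    have hpj : (arr.take nn)[j] = arr[j] := List.getElem_take
    have harr : (arr.take nn).drop j = arr[j] :: (arr.take nn).drop (j + 1) := by
      rw [List.drop_eq_getElem_cons hjp, hpj]
    have hzd : z.drop j = z[j] :: z.drop (j + 1) := List.drop_eq_getElem_cons hzj
    have hgz : PySem.List.pyGet? z (j : Int) = some z[j] := by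
      rw [PySem.List.pyGet?_natCast, List.getElem?_eq_getElem hzj]
    have hga : PySem.List.pyGet? arr (j : Int) = some arr[j] := by
      rw [PySem.List.pyGet?_natCast, List.getElem?_eq_getElem hja]
    have htakez : z.take (j + 1) = z.take j ++ [z[j]] := by
      rw [List.take_add_one]; simp [List.getElem?_eq_getElem hzj]
    have htakea : (arr.take nn).take (j + 1) = (arr.take nn).take j ++ [arr[j]] := by
      rw [List.take_add_one, List.getElem?_eq_getElem hjp, hpj]; simp
    have hlen_take : (z.take j).length = ((arr.take nn).take j).length := by
      simp [List.length_take]; omega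
    have hcastj : ((j : Int) + 1) = ((j + 1 : Nat) : Int) := by push_cast; ring
    rw [solveLoop, dif_pos (show (j : Int) < (nn : Int) by exact_mod_cast hjN)]
    by_cases hz0 : z[j] = (0 : Int)
    · -- flag is 0: compare arr[j] with the current target element
      by_cases hmv : s[m]? = some arr[j]
      · -- match: consume
        obtain ⟨hm2, hv⟩ := List.getElem?_eq_some_iff.mp hmv
        have hgs : PySem.List.pyGet? s (m : Int) = some (s[m]'hm2) := by
          rw [PySem.List.pyGet?_natCast, List.getElem?_eq_getElem hm2]
        have hcond : PySem.List.pyGet? z (j : Int) = some 0 ∧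
            PySem.List.pyGet? arr (j : Int) = PySem.List.pyGet? s (m : Int) := by
          refine ⟨by rw [hgz, hz0], by rw [hga, hgs, hv]⟩
        rw [if_pos hcond]
        have hz2len : (z.set ((j : Int)).toNat 1).length = nn := by
          simp [hz]
        have htn : ((j : Int)).toNat = j := Int.toNat_natCast j
        rw [htn] at hz2len ⊢
        have hcastm : ((m : Int) + 1) = ((m + 1 : Nat) : Int) := by push_cast; ring
        obtain ⟨z', h1, h2, h3⟩ := ih (j + 1) (m + 1) (z.set j 1) (by omega) hz2len (by omega)
        have hdropset : (z.set j 1).drop (j + 1) = z.drop (j + 1) := by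
          rw [List.drop_set]; simp
        have hsd : s.drop m = s[m]'hm2 :: s.drop (m + 1) := List.drop_eq_getElem_cons hm2
        have hpass : passL (mask (z.drop j) ((arr.take nn).drop j)) (s.drop m)
            = passL (mask (z.drop (j + 1)) ((arr.take nn).drop (j + 1))) (s.drop (m + 1)) := by
          rw [hzd, harr, hsd]
          simp only [mask, hz0, passL, reduceIte]
          rw [if_pos hv.symm]
        rw [hdropset] at h1 h3
        refine ⟨z', ?_, h2, ?_⟩
        · rw [hcastj, hcastm, h1, hpass]
          have hlsd : (s.drop m).length = (s.drop (m + 1)).length + 1 := by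
            simp [List.length_drop]; omega
          have hple := passL_snd_length_le
            (mask (z.drop (j + 1)) ((arr.take nn).drop (j + 1))) (s.drop (m + 1))
          have : (m + 1) + ((s.drop (m + 1)).length -
              (passL (mask (z.drop (j + 1)) ((arr.take nn).drop (j + 1))) (s.drop (m + 1))).2.length)
              = m + ((s.drop m).length -
              (passL (mask (z.drop (j + 1)) ((arr.take nn).drop (j + 1))) (s.drop (m + 1))).2.length) := by
            omega
          rw [this]
        · rw [h3, hpass]
          have htk : (z.set j 1).take (j + 1) = z.take j ++ [1] := by
            have hlt : (List.take j z).length = j := by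
              simp [List.length_take]; omega
            have h0 : ¬ j < (List.take j z).length := by rw [hlt]; omega
            rw [List.take_set, htakez, List.set_append, if_neg h0, hlt, Nat.sub_self]
            simp
          rw [htk, htakea, mask_append _ _ _ _ hlen_take]
          simp [mask]
      · -- no match: skip position j
        have hcond : ¬ (PySem.List.pyGet? z (j : Int) = some 0 ∧
            PySem.List.pyGet? arr (j : Int) = PySem.List.pyGet? s (m : Int)) := by
          rintro ⟨-, h2⟩
          rw [hga, PySem.List.pyGet?_natCast] at h2
          exact hmv h2.symm
        rw [if_neg hcond]
        obtain ⟨z', h1, h2, h3⟩ := ih (j + 1) m z (by omega) hz hm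
        have hpass : (passL (mask (z.drop j) ((arr.take nn).drop j)) (s.drop m)).1
              = arr[j] :: (passL (mask (z.drop (j + 1)) ((arr.take nn).drop (j + 1))) (s.drop m)).1 ∧
            (passL (mask (z.drop j) ((arr.take nn).drop j)) (s.drop m)).2
              = (passL (mask (z.drop (j + 1)) ((arr.take nn).drop (j + 1))) (s.drop m)).2 := by
          rw [hzd, harr]
          by_cases hm2 : m < s.length
          · have hsd : s.drop m = s[m]'hm2 :: s.drop (m + 1) := List.drop_eq_getElem_cons hm2
            have hv : ¬ arr[j] = s[m]'hm2 := by
              intro h; exact hmv (List.getElem?_eq_some_iff.mpr ⟨hm2, h.symm⟩)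
            rw [hsd]
            simp only [mask, hz0, passL, reduceIte]
            rw [if_neg hv]
            exact ⟨rfl, rfl⟩
          · have hsd : s.drop m = [] := List.drop_eq_nil_of_le (by omega)
            rw [hsd]
            simp only [mask, hz0, passL_nil_target, passL, reduceIte]
            constructor <;> first | rfl | trivial
        refine ⟨z', ?_, h2, ?_⟩
        · rw [hcastj, h1, hpass.2]
        · rw [h3, hpass.1, htakez, htakea, mask_append _ _ _ _ hlen_take]
          simp [mask, hz0]
    · -- flag is 1: skip position j, nothing changes
      have hcond : ¬ (PySem.List.pyGet? z (j : Int) = some 0 ∧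
          PySem.List.pyGet? arr (j : Int) = PySem.List.pyGet? s (m : Int)) := by
        rintro ⟨h1, -⟩
        rw [hgz] at h1
        exact hz0 (Option.some_injective _ h1)
      rw [if_neg hcond]
      obtain ⟨z', h1, h2, h3⟩ := ih (j + 1) m z (by omega) hz hm
      have hmaskeq : mask (z.drop j) ((arr.take nn).drop j)
          = mask (z.drop (j + 1)) ((arr.take nn).drop (j + 1)) := by
        rw [hzd, harr]; simp [mask, hz0]
      refine ⟨z', ?_, h2, ?_⟩
      · rw [hcastj, hmaskeq, h1]
      · rw [hmaskeq, h3, htakez, htakea, mask_append _ _ _ _ hlen_take]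
        simp [mask, hz0]

-- B's fold accumulates exactly the leftover of the abstract greedy pass,
-- and its counter advances by the number of consumed target elements.
lemma foldB (s : List Int) :
    ∀ (xs : List Int) (m : Nat) (rem : List Int),
      xs.foldl
        (fun (st : Int × List Int) x =>
          if st.1 < (s.length : Int) ∧ PySem.List.pyGet? s st.1 = some x then
            (st.1 + 1, st.2)
          else (st.1, st.2 ++ [x]))
        ((m : Int), rem)
      = (((m + ((s.drop m).length - (passL xs (s.drop m)).2.length) : Nat) : Int),
         rem ++ (passL xs (s.drop m)).1) := by
  intro xs
  induction xs with
  | nil => intro m rem; simp [passL]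
  | cons x xs ih =>
    intro m rem
    by_cases hm : m < s.length
    · have hdrop : s.drop m = s[m] :: s.drop (m + 1) := List.drop_eq_getElem_cons hm
      have hget : PySem.List.pyGet? s (m : Int) = some s[m] := by
        rw [PySem.List.pyGet?_natCast, List.getElem?_eq_getElem hm]
      by_cases hx : s[m] = x
      · have hcond : ((m : Int) < (s.length : Int) ∧ PySem.List.pyGet? s (m : Int) = some x) := by
          refine ⟨by exact_mod_cast hm, by rw [hget, hx]⟩
        simp only [List.foldl_cons, if_pos hcond]
        rw [hdrop]
        simp only [passL, hx.symm, reduceIte]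
        rw [show ((m : Int) + 1) = ((m + 1 : Nat) : Int) by push_cast; ring, ih (m + 1) rem]
        have hlsd : (s.drop m).length = (s.drop (m + 1)).length + 1 := by
          simp [List.length_drop]; omega
        have hple := passL_snd_length_le xs (s.drop (m + 1))
        have : (m + 1) + ((s.drop (m + 1)).length - (passL xs (s.drop (m + 1))).2.length)
            = m + ((s.drop m).length - (passL xs (s.drop (m + 1))).2.length) := by omega
        rw [this, hdrop]
      · have hcond : ¬ ((m : Int) < (s.length : Int) ∧ PySem.List.pyGet? s (m : Int) = some x) := by
          rintro ⟨-, h2⟩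
          rw [hget] at h2
          exact hx (Option.some_injective _ h2)
        simp only [List.foldl_cons, if_neg hcond]
        rw [ih m (rem ++ [x]), hdrop]
        have hne : ¬ x = s[m] := fun h => hx h.symm
        simp [passL, hne, List.append_assoc]
    · have hcond : ¬ ((m : Int) < (s.length : Int) ∧ PySem.List.pyGet? s (m : Int) = some x) := by
        rintro ⟨h1, -⟩
        exact hm (by exact_mod_cast h1)
      have hdrop : s.drop m = [] := List.drop_eq_nil_of_le (by omega)
      simp only [List.foldl_cons, if_neg hcond]
      rw [ih m (rem ++ [x]), hdrop]
      simp [passL_nil_target, passL, List.append_assoc]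

theorem solve_spec : Claim_equal_solve := by
  unfold Claim_equal_solve Spec_solve Pre_solve
  intro n arr _ hpre
  have hrange : PySem.List.pyRange 0 2 1 = [0, 1] := by decide
  by_cases hneg : n < 0
  · -- n < 0: A's while loop never runs (counter1 = counter2 = 0), B scans the empty prefix
    have hstop : ∀ (z : List Int) (c2 : Int),
        solveLoop n arr (PySem.List.sorted arr (fun x => x)) z 0 c2 = (z, 0, c2) := by
      intro z c2
      rw [solveLoop, dif_neg (by omega)]
    have hmax : max 0 n = 0 := by omega
    simp only [solve, solve_alt, hrange, List.foldl_cons, List.foldl_nil, hstop, hmax,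
      PySem.List.slice_to arr (le_refl (0 : Int)), Int.toNat_zero, List.take_zero]
    simp only [List.foldl_nil, List.length_nil, Nat.cast_zero, add_zero,
      PySem.List.slice_zero_start,
      PySem.List.slice_to (PySem.List.sorted arr (fun x => x)) (le_refl (0 : Int))]
    simp
  · -- 0 ≤ n ≤ len(arr)
    obtain ⟨nn, rfl⟩ : ∃ nn : Nat, n = (nn : Int) :=
      ⟨n.toNat, (Int.toNat_of_nonneg (by omega)).symm⟩
    have hnn : nn ≤ arr.length := by exact_mod_cast hpre
    have hmax : max 0 ((nn : Nat) : Int) = ((nn : Nat) : Int) := by omega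
    have hplen : (arr.take nn).length = nn := by simp [List.length_take]; omega
    -- A's two passes via the bridge
    obtain ⟨z1, h1, hz1, hm1⟩ := loop_bridge arr (PySem.List.sorted arr (fun x => x)) nn hnn
      nn 0 0 (List.replicate nn 0) (by omega) (by simp) (by omega)
    simp only [List.drop_zero, List.take_zero, Nat.cast_zero, Nat.zero_add] at h1 hm1
    rw [mask_replicate_zero_of_len _ _ hplen] at h1 hm1
    have hm1' : mask z1 (arr.take nn)
        = (passL (arr.take nn) (PySem.List.sorted arr (fun x => x))).1 := by
      rw [hm1]; simp [mask]
    have ht1 : (PySem.List.sorted arr (fun x => x)).drop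
        ((PySem.List.sorted arr (fun x => x)).length
          - (passL (arr.take nn) (PySem.List.sorted arr (fun x => x))).2.length)
        = (passL (arr.take nn) (PySem.List.sorted arr (fun x => x))).2 :=
      (passL_snd_eq_drop (arr.take nn) (PySem.List.sorted arr (fun x => x))).symm
    obtain ⟨z2, h2, hz2, hm2⟩ := loop_bridge arr (PySem.List.sorted arr (fun x => x)) nn hnn
      nn 0
      ((PySem.List.sorted arr (fun x => x)).length
        - (passL (arr.take nn) (PySem.List.sorted arr (fun x => x))).2.length)
      z1 (by omega) hz1 (by omega)
    simp only [List.drop_zero, List.take_zero, Nat.cast_zero] at h2 hm2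
    rw [hm1', ht1] at h2
    -- length bookkeeping
    have hperm1 := (passL_perm (arr.take nn) (PySem.List.sorted arr (fun x => x))).length_eq
    have hperm2 := (passL_perm (passL (arr.take nn) (PySem.List.sorted arr (fun x => x))).1
      (passL (arr.take nn) (PySem.List.sorted arr (fun x => x))).2).length_eq
    simp only [List.length_append] at hperm1 hperm2
    have hle1 := passL_snd_length_le (arr.take nn) (PySem.List.sorted arr (fun x => x))
    have hle2 := passL_snd_length_le (passL (arr.take nn) (PySem.List.sorted arr (fun x => x))).1
      (passL (arr.take nn) (PySem.List.sorted arr (fun x => x))).2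
    -- the key equivalence: A's final counter reaches n iff the leftover is the next
    -- chunk of the sorted array
    have key : nn
        = ((PySem.List.sorted arr (fun x => x)).length
            - (passL (arr.take nn) (PySem.List.sorted arr (fun x => x))).2.length)
          + ((passL (arr.take nn) (PySem.List.sorted arr (fun x => x))).2.length
            - (passL (passL (arr.take nn) (PySem.List.sorted arr (fun x => x))).1
                (passL (arr.take nn) (PySem.List.sorted arr (fun x => x))).2).2.length)
        ↔ (passL (arr.take nn) (PySem.List.sorted arr (fun x => x))).1
            = (passL (arr.take nn) (PySem.List.sorted arr (fun x => x))).2.take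
                (passL (arr.take nn) (PySem.List.sorted arr (fun x => x))).1.length := by
      constructor
      · intro h
        have hr2 : (passL (passL (arr.take nn) (PySem.List.sorted arr (fun x => x))).1
            (passL (arr.take nn) (PySem.List.sorted arr (fun x => x))).2).1 = [] := by
          rw [← List.length_eq_zero_iff]
          omega
        have hsplit := passL_fst_nil (passL (arr.take nn) (PySem.List.sorted arr (fun x => x))).1
          (passL (arr.take nn) (PySem.List.sorted arr (fun x => x))).2 hr2
        rw [hsplit, List.take_left]
      · intro h
        have hsplit : (passL (arr.take nn) (PySem.List.sorted arr (fun x => x))).2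
            = (passL (arr.take nn) (PySem.List.sorted arr (fun x => x))).1
              ++ (passL (arr.take nn) (PySem.List.sorted arr (fun x => x))).2.drop
                  (passL (arr.take nn) (PySem.List.sorted arr (fun x => x))).1.length := by
          conv_lhs => rw [← List.take_append_drop
            (passL (arr.take nn) (PySem.List.sorted arr (fun x => x))).1.length
            (passL (arr.take nn) (PySem.List.sorted arr (fun x => x))).2]
          rw [← h]
        have hrun : passL (passL (arr.take nn) (PySem.List.sorted arr (fun x => x))).1
            (passL (arr.take nn) (PySem.List.sorted arr (fun x => x))).2
            = ([], (passL (arr.take nn) (PySem.List.sorted arr (fun x => x))).2.drop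
                (passL (arr.take nn) (PySem.List.sorted arr (fun x => x))).1.length) := by
          conv_lhs => rw [hsplit]
          exact passL_prefix _ _
        have hr1le := congrArg List.length hsplit
        simp only [List.length_append] at hr1le
        rw [hrun]
        simp only [List.length_drop]
        omega
    -- unfold both programs and compute
    simp only [solve, solve_alt, hrange, List.foldl_cons, List.foldl_nil, Int.toNat_natCast,
      hmax, PySem.List.slice_to arr (Int.natCast_nonneg nn), Int.toNat_natCast]
    rw [h1]
    simp only []
    rw [h2]
    have hB := foldB (PySem.List.sorted arr (fun x => x)) (arr.take nn) 0 []
    simp only [Nat.cast_zero, List.drop_zero, List.nil_append, Nat.zero_add] at hB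
    rw [hB]
    rw [PySem.List.slice_natCast_add]
    rw [ht1]
    by_cases hr : (passL (arr.take nn) (PySem.List.sorted arr (fun x => x))).1
        = (passL (arr.take nn) (PySem.List.sorted arr (fun x => x))).2.take
            (passL (arr.take nn) (PySem.List.sorted arr (fun x => x))).1.length
    · have hn := key.mpr hr
      have hni : ((nn : Nat) : Int) = _ := (by exact_mod_cast hn :
        ((nn : Nat) : Int) = ↑(((PySem.List.sorted arr (fun x => x)).length
            - (passL (arr.take nn) (PySem.List.sorted arr (fun x => x))).2.length)
          + ((passL (arr.take nn) (PySem.List.sorted arr (fun x => x))).2.length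
            - (passL (passL (arr.take nn) (PySem.List.sorted arr (fun x => x))).1
                (passL (arr.take nn) (PySem.List.sorted arr (fun x => x))).2).2.length)))
      rw [if_pos (beq_iff_eq.mpr hni), if_pos (beq_iff_eq.mpr hr)]
    · have hnn' := fun h => hr (key.mp h)
      have hni : (((nn : Nat) : Int)) ≠
          ↑(((PySem.List.sorted arr (fun x => x)).length
            - (passL (arr.take nn) (PySem.List.sorted arr (fun x => x))).2.length)
          + ((passL (arr.take nn) (PySem.List.sorted arr (fun x => x))).2.length
            - (passL (passL (arr.take nn) (PySem.List.sorted arr (fun x => x))).1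
                (passL (arr.take nn) (PySem.List.sorted arr (fun x => x))).2).2.length)) := by
        exact_mod_cast hnn'
      rw [if_neg (fun h => hni (beq_iff_eq.mp h)), if_neg (fun h => hr (beq_iff_eq.mp h))]
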